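-- pv_equiv track=rewrite | github.com/rm2631/PKM_RL_Project | utils/reward_functions.py | handle_downed_pokemon
-- ===== SOURCE A (Python) =====
-- def handle_downed_pokemon(current_value: [int], previous_value: [int]):
--     """
--     Reward function for handling downed pokemon
--     """
--     downed_pokemon_reward = -1
--     reward_list = []
--     for current_value, previous_value in zip(current_value, previous_value):
--         if current_value == 0 and previous_value > 0:
--             reward_list.append(downed_pokemon_reward)
--     reward = sum(reward_list)
--
--     if reward != 0:
--         ## If the reward is not 0, we want to make sure that the reward is not too big to avoid traumas
--         reward = max(reward, -1)
--     return reward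
-- ===== SOURCE B (Python) =====
-- def handle_downed_pokemon(current_value: [int], previous_value: [int]):
--     """
--     Reward function for handling downed pokemon
--     """
--     if any(c == 0 and p > 0 for c, p in zip(current_value, previous_value)):
--         return -1
--     return 0
-- ===== Notes on version B (the rewrite author's own statement) =====
-- stated objective: simpler
-- what changed: Replaced the build-list/sum/clamp pipeline with a single short-circuiting existence check over the zipped pair, returning -1 or 0 directly.
import Mathlib
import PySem

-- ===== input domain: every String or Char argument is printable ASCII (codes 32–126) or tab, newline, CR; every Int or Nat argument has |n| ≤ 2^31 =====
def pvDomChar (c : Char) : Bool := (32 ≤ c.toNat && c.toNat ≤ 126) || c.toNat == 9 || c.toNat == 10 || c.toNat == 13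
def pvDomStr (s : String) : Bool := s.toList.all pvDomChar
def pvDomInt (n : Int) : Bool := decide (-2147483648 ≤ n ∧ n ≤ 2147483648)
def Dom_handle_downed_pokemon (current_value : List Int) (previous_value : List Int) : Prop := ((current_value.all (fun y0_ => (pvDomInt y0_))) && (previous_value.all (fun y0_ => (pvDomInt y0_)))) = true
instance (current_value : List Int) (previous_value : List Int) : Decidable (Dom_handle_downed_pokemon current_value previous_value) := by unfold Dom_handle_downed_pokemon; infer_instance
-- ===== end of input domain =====

-- ===== PORT A =====
-- literal port of A: build reward_list by appending -1 per downed pokemon, sum, then cap at -1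
def handle_downed_pokemon (current_value : List Int) (previous_value : List Int) : Int :=
  let downed_pokemon_reward : Int := -1
  let reward_list : List Int :=
    (current_value.zip previous_value).foldl
      (fun acc p => if p.1 = 0 ∧ p.2 > 0 then acc ++ [downed_pokemon_reward] else acc) []
  let reward := reward_list.sum
  if reward ≠ 0 then max reward (-1) else reward

-- ===== PORT B =====
-- B: single existence check over the zipped lists
def handle_downed_pokemon_alt (current_value : List Int) (previous_value : List Int) : Int :=
  if (current_value.zip previous_value).any (fun p => p.1 == 0 && p.2 > 0) then -1 else 0

-- ===== PRECONDITION & SPEC =====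
def Spec_handle_downed_pokemon (current_value : List Int) (previous_value : List Int) (out : Int) : Prop := out = handle_downed_pokemon_alt current_value previous_value
instance (current_value : List Int) (previous_value : List Int) (out : Int) : Decidable (Spec_handle_downed_pokemon current_value previous_value out) := by unfold Spec_handle_downed_pokemon; infer_instance

-- ===== CLAIM (what is proved, stated in full; the proofs are below) =====
def Claim_equal_handle_downed_pokemon : Prop := ∀ (current_value : List Int) (previous_value : List Int), Dom_handle_downed_pokemon current_value previous_value → Spec_handle_downed_pokemon current_value previous_value (handle_downed_pokemon current_value previous_value)

-- ===== LEMMAS AND PROOFS =====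

theorem pv_foldA (l : List (Int × Int)) (acc : List Int) :
    l.foldl (fun acc p => if p.1 = 0 ∧ p.2 > 0 then acc ++ [(-1 : Int)] else acc) acc
      = acc ++ (l.filter (fun p => p.1 == 0 && p.2 > 0)).map (fun _ => (-1 : Int)) := by
  induction l generalizing acc with
  | nil => simp
  | cons h t ih =>
    by_cases hc : h.1 = 0 ∧ h.2 > 0
    · simp [List.foldl, hc, ih]
    · simp only [List.foldl, List.filter_cons]
      rw [if_neg hc, ih]
      have hb : (h.1 == 0 && decide (h.2 > 0)) = false := by
        rcases Decidable.not_and_iff_not_or_not.mp hc with h1 | h2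
        · simp [h1]
        · simp [h2]
      simp [hb]

theorem pv_sum_const (l : List (Int × Int)) :
    ((l.map (fun _ => (-1 : Int))).sum) = -(l.length : Int) := by
  induction l with
  | nil => simp
  | cons h t ih => simp

theorem handle_downed_pokemon_eq (cv pv : List Int) :
    handle_downed_pokemon cv pv = handle_downed_pokemon_alt cv pv := by
  unfold handle_downed_pokemon handle_downed_pokemon_alt
  simp only [pv_foldA, List.nil_append, pv_sum_const]
  by_cases hne : (cv.zip pv).filter (fun p => p.1 == 0 && p.2 > 0) = []
  · have hany : (cv.zip pv).any (fun p => p.1 == 0 && p.2 > 0) = false := by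
      rw [List.any_eq_false]
      intro x hx
      have := List.filter_eq_nil_iff.mp hne x hx
      simpa using this
    rw [hne, hany]; simp
  · have hany : (cv.zip pv).any (fun p => p.1 == 0 && p.2 > 0) = true := by
      rcases List.exists_mem_of_ne_nil _ hne with ⟨x, hx⟩
      rw [List.any_eq_true]
      exact ⟨x, (List.mem_filter.mp hx).1, (List.mem_filter.mp hx).2⟩
    have hpos : 0 < ((cv.zip pv).filter (fun p => p.1 == 0 && p.2 > 0)).length :=
      List.length_pos_iff.mpr hne
    have hlen : 1 ≤ (((cv.zip pv).filter (fun p => p.1 == 0 && p.2 > 0)).length : Int) := by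
      exact_mod_cast hpos
    have h0 : -(((cv.zip pv).filter (fun p => p.1 == 0 && p.2 > 0)).length : Int) ≠ 0 := by omega
    rw [hany, if_pos rfl, if_pos h0]
    exact max_eq_right (by omega)

-- ===== VERDICT (by name: the statement is the Claim_ definition above) =====
theorem handle_downed_pokemon_spec : Claim_equal_handle_downed_pokemon := by
  intro cv pv _
  unfold Spec_handle_downed_pokemon
  exact handle_downed_pokemon_eq cv pv
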